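-- pv_equiv track=rewrite | github.com/AlexSharon/newGitTest | EEA3.py | find_coprime
-- ===== SOURCE A (Python) =====
-- def gcd(a, b):
--     """returns gcd of two values"""
--     while(a != 0 and b != 0):
--         if(a >= b):
--             a = a % b
--         else:
--             b = b % a
--     return a + b
--
-- def prime_test(a):
--     """test of 'a' for being a prime"""
--     for i in range(2, a):
--         if a % i == 0:
--             return False
--     return True
--
-- def find_coprime(a, number=1):
--     """Function which takes as an input prime number "a" and return coprime to "a". By default return one coprime.
--     If passed with non-default value of "number", eg 5, then returns a list of 5 coprimes"""
--     b = 2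
--     res = []
--
--     while (len(res) < number):
--         if gcd(a, b) == 1 and prime_test(b):
--             res.append(b)
--             b += 1
--         else:
--             b += 1
--
--     return res
-- ===== SOURCE B (Python) =====
-- def find_coprime(a, number=1):
--     """Incremental prime generation: test each candidate only against the
--     primes already found (stopping at sqrt), and test coprimality of a prime
--     candidate by a single remainder a % c instead of a Euclid loop."""
--     res = []
--     primes = []
--     c = 2
--     while len(res) < number:
--         is_p = True
--         for p in primes:
--             if p * p > c:
--                 break
--             if c % p == 0:
--                 is_p = False
--                 break
--         if is_p:
--             primes.append(c)
--             if a % c != 0: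
--                 res.append(c)
--         c += 1
--     return res
-- ===== Notes on version B (the rewrite author's own statement) =====
-- stated objective: faster
-- what changed: B generates primes incrementally, testing each candidate only against the previously found primes up to its square root, and tests coprimality of a prime candidate with a single remainder a % c, instead of A's full trial division over range(2,b) plus a Euclid gcd loop per candidate.
import Mathlib
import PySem

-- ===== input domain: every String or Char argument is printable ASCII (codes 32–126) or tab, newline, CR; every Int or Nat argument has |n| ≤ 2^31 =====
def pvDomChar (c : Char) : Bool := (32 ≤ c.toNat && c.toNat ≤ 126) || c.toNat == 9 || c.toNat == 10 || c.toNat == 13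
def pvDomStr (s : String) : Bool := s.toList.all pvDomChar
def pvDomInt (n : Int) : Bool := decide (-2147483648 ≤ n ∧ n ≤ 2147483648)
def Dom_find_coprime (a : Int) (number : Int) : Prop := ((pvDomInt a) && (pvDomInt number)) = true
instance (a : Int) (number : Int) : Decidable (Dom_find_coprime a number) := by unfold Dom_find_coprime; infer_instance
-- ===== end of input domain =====

-- B replaces A's per-candidate Euclid-gcd + full trial division by incremental prime
-- generation (divide only by stored primes up to sqrt) and a single remainder test a % c.
-- Both while-loops are unbounded in Python; the ports use a generous shared fuel bound
-- (amply sufficient on all inputs meeting Pre_, where the Python loops terminate).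

-- fuel for both ports' main loops (same expression: a totality device, not part of either algorithm)
def pvFuel (number : Int) : Nat := 64 * (number.toNat + 16)

-- ===== PORT A =====
-- while(a != 0 and b != 0): …  — fueled; natAbs-sum fuel suffices whenever the Python loop terminates
def pvGcdLoop : Nat → Int → Int → Int
  | 0, a, b => a + b
  | f + 1, a, b =>
    if a ≠ 0 ∧ b ≠ 0 then
      (if b ≤ a then pvGcdLoop f (PySem.Int.mod a b) b else pvGcdLoop f a (PySem.Int.mod b a))
    else a + b

def pvGcd (a b : Int) : Int := pvGcdLoop (a.natAbs + b.natAbs + 1) a b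

def pvPrimeTest (a : Int) : Bool :=
  (PySem.List.pyRange 2 a 1).all (fun i => !(PySem.Int.mod a i == 0))

def pvLoopA (a number : Int) : Nat → Int → List Int → List Int
  | 0, _, res => res
  | f + 1, b, res =>
    if (res.length : Int) < number then
      (if pvGcd a b = 1 ∧ pvPrimeTest b = true then pvLoopA a number f (b + 1) (res ++ [b])
       else pvLoopA a number f (b + 1) res)
    else res

def find_coprime (a : Int) (number : Int) : List Int :=
  pvLoopA a number (pvFuel number) 2 []

-- ===== PORT B =====
-- 'for p in primes: if p*p > c: break; if c % p == 0: is_p = False; break'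
def pvIsPrimeB : List Int → Int → Bool
  | [], _ => true
  | p :: ps, c =>
    if c < p * p then true
    else if PySem.Int.mod c p == 0 then false
    else pvIsPrimeB ps c

def pvLoopB (a number : Int) : Nat → Int → List Int → List Int → List Int
  | 0, _, _, res => res
  | f + 1, c, primes, res =>
    if (res.length : Int) < number then
      (if pvIsPrimeB primes c then
         (if ¬(PySem.Int.mod a c = 0) then pvLoopB a number f (c + 1) (primes ++ [c]) (res ++ [c])
          else pvLoopB a number f (c + 1) (primes ++ [c]) res)
       else pvLoopB a number f (c + 1) primes res)
    else res

def find_coprime_alt (a : Int) (number : Int) : List Int :=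
  pvLoopB a number (pvFuel number) 2 [] []

-- ===== PRECONDITION & SPEC =====
-- For a ≤ 0 with number ≥ 1 Python's A never returns (gcd(a,b) is never 1, or gcd itself
-- loops forever), so those inputs are excluded; Pre_ admits exactly the inputs where A returns.
def Pre_find_coprime (a : Int) (number : Int) : Prop := 1 ≤ a ∨ number ≤ 0
instance (a : Int) (number : Int) : Decidable (Pre_find_coprime a number) := by
  unfold Pre_find_coprime; infer_instance

def pvWitness_find_coprime : Int × Int := (7, 3)

def Spec_find_coprime (a : Int) (number : Int) (out : List Int) : Prop := out = find_coprime_alt a number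
instance (a : Int) (number : Int) (out : List Int) : Decidable (Spec_find_coprime a number out) := by unfold Spec_find_coprime; infer_instance

-- ===== CLAIM (what is proved, stated in full; the proofs are below) =====
def Claim_equal_find_coprime : Prop := ∀ (a : Int) (number : Int), Dom_find_coprime a number → Pre_find_coprime a number → Spec_find_coprime a number (find_coprime a number)

-- ===== LEMMAS AND PROOFS =====

-- A's hand-written gcd computes Int.gcd on nonnegative inputs, given enough fuel
theorem pvGcdLoop_eq_gcd : ∀ (f : Nat) (a b : Int), 0 ≤ a → 0 ≤ b →
    a.natAbs + b.natAbs < f → pvGcdLoop f a b = (Int.gcd a b : Int) := by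
  intro f
  induction f with
  | zero => intro a b _ _ h; omega
  | succ f ih =>
    intro a b ha hb hf
    rw [pvGcdLoop]
    by_cases hz : a ≠ 0 ∧ b ≠ 0
    · rw [if_pos hz]
      obtain ⟨ha0, hb0⟩ := hz
      by_cases hba : b ≤ a
      · rw [if_pos hba, PySem.Int.mod_eq_emod_of_pos (by omega)]
        have h1 : 0 ≤ a % b := Int.emod_nonneg a hb0
        have h2 : a % b < b := Int.emod_lt_of_pos a (by omega)
        rw [ih _ _ h1 hb (by omega), Int.gcd_emod a b]
      · rw [if_neg hba, PySem.Int.mod_eq_emod_of_pos (by omega)]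
        have h1 : 0 ≤ b % a := Int.emod_nonneg b ha0
        have h2 : b % a < a := Int.emod_lt_of_pos b (by omega)
        rw [ih _ _ ha h1 (by omega), Int.gcd_comm, Int.gcd_emod b a, Int.gcd_comm]
    · rw [if_neg hz]
      rcases not_and_or.mp hz with h | h
      · have : a = 0 := by omega
        subst this
        simp only [Int.gcd, Int.natAbs_zero, Nat.gcd_zero_left]
        omega
      · have : b = 0 := by omega
        subst this
        simp only [Int.gcd, Int.natAbs_zero, Nat.gcd_zero_right]
        omega

theorem pvGcd_eq (a b : Int) (ha : 0 ≤ a) (hb : 0 ≤ b) : pvGcd a b = (Int.gcd a b : Int) :=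
  pvGcdLoop_eq_gcd _ a b ha hb (by omega)

-- A's trial division decides primality of the candidate
theorem pvPrimeTest_iff (c : Int) (hc : 2 ≤ c) : pvPrimeTest c = true ↔ Nat.Prime c.toNat := by
  rw [pvPrimeTest, List.all_eq_true]
  constructor
  · intro h
    rw [Nat.prime_def_lt]
    refine ⟨by omega, fun m hm hdvd => ?_⟩
    by_contra hm1
    have hm2 : 2 ≤ m := by
      rcases Nat.lt_or_ge m 2 with h2 | h2
      · interval_cases m
        · have := Nat.eq_zero_of_zero_dvd hdvd; omega
        · omega
      · exact h2
    have hmem : (m : Int) ∈ PySem.List.pyRange 2 c 1 := by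
      rw [PySem.List.mem_pyRange_one]; omega
    have := h _ hmem
    rw [Bool.not_eq_eq_eq_not, Bool.not_true, beq_eq_false_iff_ne] at this
    apply this
    rw [PySem.Int.mod_eq_zero_iff_dvd]
    have : (m : Int) ∣ (c.toNat : Int) := Int.natCast_dvd_natCast.mpr hdvd
    rwa [Int.toNat_of_nonneg (by omega)] at this
  · intro hp i hi
    rw [PySem.List.mem_pyRange_one] at hi
    rw [Bool.not_eq_eq_eq_not, Bool.not_true, beq_eq_false_iff_ne]
    intro hmod
    rw [PySem.Int.mod_eq_zero_iff_dvd] at hmod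
    have hdvd : i.toNat ∣ c.toNat := by
      rw [← Int.natCast_dvd_natCast, Int.toNat_of_nonneg (by omega), Int.toNat_of_nonneg (by omega)]
      exact hmod
    have := (Nat.prime_def_lt.mp hp).2 i.toNat (by omega) hdvd
    omega

-- the invariant carried by B's primes list
def pvInv (c : Int) (primes : List Int) : Prop :=
  (∀ p : Int, p ∈ primes ↔ (2 ≤ p ∧ p < c ∧ Nat.Prime p.toNat)) ∧ List.Pairwise (· < ·) primes

-- B's bounded scan over the stored primes, under the invariant, decides the same primality
theorem pvIsPrimeB_chain : ∀ (primes : List Int) (c : Int),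
    (∀ p ∈ primes, 2 ≤ p) → List.Pairwise (· < ·) primes →
    (pvIsPrimeB primes c = true ↔ ∀ p ∈ primes, p * p ≤ c → ¬ (p ∣ c)) := by
  intro primes
  induction primes with
  | nil => intro c _ _; simp [pvIsPrimeB]
  | cons p ps ih =>
    intro c hpos hpair
    rw [pvIsPrimeB]
    have hp2 : 2 ≤ p := hpos p (by simp)
    by_cases hlt : c < p * p
    · rw [if_pos hlt]
      simp only [true_iff]
      intro q hq hqq
      rcases List.mem_cons.mp hq with rfl | hq'
      · omega
      · exfalso
        have hpq : p < q := (List.pairwise_cons.mp hpair).1 q hq'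
        have : p * p < q * q := by nlinarith
        omega
    · rw [if_neg hlt]
      by_cases hdv : PySem.Int.mod c p == 0
      · rw [if_pos hdv]
        simp only [Bool.false_eq_true, false_iff]
        intro h
        refine (h p (by simp) (by omega)) ?_
        rw [beq_iff_eq, PySem.Int.mod_eq_zero_iff_dvd] at hdv
        exact hdv
      · rw [if_neg hdv]
        rw [ih c (fun q hq => hpos q (List.mem_cons_of_mem _ hq)) (List.pairwise_cons.mp hpair).2]
        rw [beq_iff_eq, PySem.Int.mod_eq_zero_iff_dvd] at hdv
        constructor
        · intro h q hq hqq
          rcases List.mem_cons.mp hq with rfl | hq'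
          · exact fun hd => hdv hd
          · exact h q hq' hqq
        · intro h q hq hqq
          exact h q (List.mem_cons_of_mem _ hq) hqq

theorem pvIsPrimeB_eq (c : Int) (primes : List Int) (hc : 2 ≤ c) (hinv : pvInv c primes) :
    pvIsPrimeB primes c = pvPrimeTest c := by
  obtain ⟨hmem, hpair⟩ := hinv
  have hpos : ∀ p ∈ primes, 2 ≤ p := fun p hp => ((hmem p).mp hp).1
  rw [Bool.eq_iff_iff, pvIsPrimeB_chain primes c hpos hpair, pvPrimeTest_iff c hc]
  constructor
  · intro h
    by_contra hnp
    set m := c.toNat.minFac with hm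
    have hm1 : c.toNat ≠ 1 := by omega
    have hmp : m.Prime := Nat.minFac_prime hm1
    have hmsq : m ^ 2 ≤ c.toNat := Nat.minFac_sq_le_self (by omega) hnp
    have hmdvd : m ∣ c.toNat := Nat.minFac_dvd _
    have hm2 : 2 ≤ m := hmp.two_le
    have hmm : m * m ≤ c.toNat := by nlinarith [hmsq]
    have h2m : 2 * m ≤ m * m := Nat.mul_le_mul_right m (by omega)
    have hmlt : m < c.toNat := by omega
    have hmmem : (m : Int) ∈ primes := by
      rw [hmem]
      refine ⟨by omega, by omega, by simpa using hmp⟩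
    have hmmI : (m : Int) * (m : Int) ≤ c := by
      have := hmm; zify at this; omega
    apply h (m : Int) hmmem hmmI
    have : (m : Int) ∣ (c.toNat : Int) := Int.natCast_dvd_natCast.mpr hmdvd
    rwa [Int.toNat_of_nonneg (by omega)] at this
  · intro hp q hq hqq hdvd
    obtain ⟨hq2, hqc, _⟩ := (hmem q).mp hq
    have hdn : q.toNat ∣ c.toNat := by
      rw [← Int.natCast_dvd_natCast, Int.toNat_of_nonneg (by omega), Int.toNat_of_nonneg (by omega)]
      exact hdvd
    rcases (Nat.Prime.eq_one_or_self_of_dvd hp _ hdn) with h1 | h1 <;> omega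

-- for prime c, gcd(a, c) = 1 iff c does not divide a
theorem pvGcd_one_iff (a c : Int) (ha : 1 ≤ a) (hc : 2 ≤ c) (hp : Nat.Prime c.toNat) :
    (pvGcd a c = 1) ↔ ¬ (PySem.Int.mod a c = 0) := by
  rw [pvGcd_eq a c (by omega) (by omega), PySem.Int.mod_eq_zero_iff_dvd]
  have hgcd : Int.gcd a c = Nat.gcd a.toNat c.toNat := by
    simp [Int.gcd]; congr 1 <;> omega
  rw [hgcd]
  have hco := Nat.Prime.coprime_iff_not_dvd (n := a.toNat) hp
  rw [Nat.Coprime, Nat.gcd_comm] at hco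
  constructor
  · intro h hdvd
    apply hco.mp (by exact_mod_cast h)
    rw [← Int.natCast_dvd_natCast, Int.toNat_of_nonneg (by omega), Int.toNat_of_nonneg (by omega)]
    exact hdvd
  · intro h
    have : ¬ c.toNat ∣ a.toNat := by
      intro hd
      apply h
      rw [← Int.natCast_dvd_natCast, Int.toNat_of_nonneg (by omega), Int.toNat_of_nonneg (by omega)] at hd
      exact hd
    exact_mod_cast hco.mpr this

-- lockstep simulation of the two fueled loops
theorem pvLoop_eq (a number : Int) (ha : 1 ≤ a) : ∀ (f : Nat) (c : Int) (primes res : List Int),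
    2 ≤ c → pvInv c primes → pvLoopA a number f c res = pvLoopB a number f c primes res := by
  intro f
  induction f with
  | zero => intro c primes res _ _; rfl
  | succ f ih =>
    intro c primes res hc hinv
    rw [pvLoopA, pvLoopB]
    by_cases hlen : (res.length : Int) < number
    · rw [if_pos hlen, if_pos hlen]
      obtain ⟨hmem, hpair⟩ := hinv
      have hB := pvIsPrimeB_eq c primes hc ⟨hmem, hpair⟩
      by_cases hp : Nat.Prime c.toNat
      · have hpt : pvPrimeTest c = true := (pvPrimeTest_iff c hc).mpr hp
        have hBt : pvIsPrimeB primes c = true := by rw [hB, hpt]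
        rw [if_pos hBt]
        have hinv' : pvInv (c + 1) (primes ++ [c]) := by
          constructor
          · intro p
            rw [List.mem_append, List.mem_singleton, hmem]
            constructor
            · rintro (⟨h1, h2, h3⟩ | rfl)
              · exact ⟨h1, by omega, h3⟩
              · exact ⟨hc, by omega, hp⟩
            · rintro ⟨h1, h2, h3⟩
              by_cases hpc : p = c
              · right; exact hpc
              · left; exact ⟨h1, by omega, h3⟩
          · rw [List.pairwise_append]
            refine ⟨hpair, List.pairwise_singleton _ _, fun p hpm q hq => ?_⟩
            rw [List.mem_singleton] at hq
            subst hq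
            exact ((hmem p).mp hpm).2.1
        by_cases hcop : PySem.Int.mod a c = 0
        · have hgcd : ¬ (pvGcd a c = 1 ∧ pvPrimeTest c = true) := by
            rintro ⟨h1, _⟩
            exact ((pvGcd_one_iff a c ha hc hp).mp h1) hcop
          rw [if_neg hgcd, if_neg (not_not_intro hcop)]
          exact ih (c + 1) (primes ++ [c]) res (by omega) hinv'
        · have hgcd : pvGcd a c = 1 ∧ pvPrimeTest c = true :=
            ⟨(pvGcd_one_iff a c ha hc hp).mpr hcop, hpt⟩
          rw [if_pos hgcd, if_pos hcop]
          exact ih (c + 1) (primes ++ [c]) (res ++ [c]) (by omega) hinv'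
      · have hpt : pvPrimeTest c = false := by
          rw [Bool.eq_false_iff]; intro h; exact hp ((pvPrimeTest_iff c hc).mp h)
        have hBt : pvIsPrimeB primes c = false := by rw [hB, hpt]
        rw [if_neg (by simp [hpt]), if_neg (by simp [hBt])]
        have hinv' : pvInv (c + 1) primes := by
          refine ⟨fun p => ?_, hpair⟩
          rw [hmem]
          constructor
          · rintro ⟨h1, h2, h3⟩; exact ⟨h1, by omega, h3⟩
          · rintro ⟨h1, h2, h3⟩
            refine ⟨h1, ?_, h3⟩
            by_contra hcon
            have : p = c := by omega
            subst this
            exact hp h3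
        exact ih (c + 1) primes res (by omega) hinv'
    · rw [if_neg hlen, if_neg hlen]

-- when the result is already full, both loops return it unchanged (used for number ≤ 0)
theorem pvLoopA_stop (a number : Int) (f : Nat) (c : Int) (res : List Int)
    (h : ¬ ((res.length : Int) < number)) : pvLoopA a number f c res = res := by
  cases f with
  | zero => rfl
  | succ f => rw [pvLoopA, if_neg h]

theorem pvLoopB_stop (a number : Int) (f : Nat) (c : Int) (primes res : List Int)
    (h : ¬ ((res.length : Int) < number)) : pvLoopB a number f c primes res = res := by
  cases f with
  | zero => rfl
  | succ f => rw [pvLoopB, if_neg h]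

-- ===== VERDICT (by name: the statement is the Claim_ definition above) =====
theorem find_coprime_spec : Claim_equal_find_coprime := by
  intro a number _ hpre
  unfold Spec_find_coprime find_coprime find_coprime_alt
  rcases hpre with ha | hn
  · exact pvLoop_eq a number ha (pvFuel number) 2 [] []
      (by omega) ⟨fun p => by simp; omega, List.Pairwise.nil⟩
  · rw [pvLoopA_stop _ _ _ _ _ (by simp; omega), pvLoopB_stop _ _ _ _ _ _ (by simp; omega)]
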